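-- pv_equiv track=rewrite | github.com/iadept/pagekeeper | main.py | intbit
-- ===== SOURCE A (Python) =====
-- def intbit(number):
--     i = 0
--     out = ''
--     for c in str(number)[::-1]:
--         if i == 3:
--             i = 0
--             out = out + " "
--         out = out + c
--         i = i + 1
--     return out[::-1]
-- ===== SOURCE B (Python) =====
-- def _group(s):
--     if len(s) <= 3:
--         return s
--     return _group(s[:-3]) + ' ' + s[-3:]
--
-- def intbit(number):
--     return _group(str(number))
-- ===== Notes on version B (the rewrite author's own statement) =====
-- stated objective: simpler
-- what changed: Replaced the reversed character scan with a mod-3 counter and a second reversal by a direct recursion that splits off the last 3-character block (_group(s[:-3]) + ' ' + s[-3:]), no reversal and no counter.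
import Mathlib
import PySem

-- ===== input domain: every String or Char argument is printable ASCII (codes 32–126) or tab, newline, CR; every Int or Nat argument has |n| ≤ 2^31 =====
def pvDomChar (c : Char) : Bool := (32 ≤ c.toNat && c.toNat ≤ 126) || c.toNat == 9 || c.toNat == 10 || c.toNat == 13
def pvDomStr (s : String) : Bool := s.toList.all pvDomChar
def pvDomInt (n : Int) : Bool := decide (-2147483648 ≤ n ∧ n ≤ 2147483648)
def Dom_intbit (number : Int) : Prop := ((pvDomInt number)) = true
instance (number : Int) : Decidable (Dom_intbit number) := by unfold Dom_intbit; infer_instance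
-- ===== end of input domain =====

-- B replaces A's reversed character scan (mod-3 counter, double reversal) by a
-- recursion that splits off the last 3-character block; objective: simpler.

-- ===== PORT A =====
-- the for-loop over str(number)[::-1] with state (i, out); [::-1] is reversal
-- (PySem.List.slice?_none_none_neg_one)
def intbitLoop (r : List Char) (st : Int × List Char) : Int × List Char :=
  r.foldl (fun p c =>
    let p' := if p.1 == 3 then ((0 : Int), p.2 ++ [' ']) else p
    (p'.1 + 1, p'.2 ++ [c])) st

def intbit (number : Int) : String :=
  String.mk ((intbitLoop (PySem.Int.toStr number).toList.reverse (0, [])).2.reverse)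

-- ===== PORT B =====
-- _group: s[:-3] = slice none (-3), s[-3:] = slice (-3) none
def groupChars (s : List Char) : List Char :=
  if s.length ≤ 3 then s
  else groupChars (PySem.List.slice s none (some (-3))) ++
       ' ' :: PySem.List.slice s (some (-3)) none
termination_by s.length
decreasing_by
  rw [PySem.List.slice_to_neg_ofNat s 3 (by omega)]
  simp [List.length_take]; omega

def intbit_alt (number : Int) : String :=
  String.mk (groupChars (PySem.Int.toStr number).toList)

-- ===== PRECONDITION & SPEC =====
def Spec_intbit (number : Int) (out : String) : Prop := out = intbit_alt number
instance (number : Int) (out : String) : Decidable (Spec_intbit number out) := by unfold Spec_intbit; infer_instance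

-- ===== CLAIM (what is proved, stated in full; the proofs are below) =====
def Claim_equal_intbit : Prop := ∀ (number : Int), Dom_intbit number → Spec_intbit number (intbit number)

-- ===== LEMMAS AND PROOFS =====

-- A's loop output (pre final reversal), characterised recursively: it emits the
-- first up-to-3 chars, then a space and restarts.
def gRev (r : List Char) : List Char :=
  if r.length ≤ 3 then r
  else r.take 3 ++ ' ' :: gRev (r.drop 3)
termination_by r.length
decreasing_by simp; omega

-- with counter 3 and a nonempty remainder, the loop behaves as if a space had
-- been appended and the counter reset
theorem loop_step3 (r : List Char) (out : List Char) (h : r ≠ []) :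
    intbitLoop r (3, out) = intbitLoop r (0, out ++ [' ']) := by
  cases r with
  | nil => exact absurd rfl h
  | cons c r => simp [intbitLoop, List.foldl]

theorem loopA : ∀ (r out : List Char), (intbitLoop r (0, out)).2 = out ++ gRev r
  | [], out => by simp [intbitLoop, gRev]
  | [a], out => by simp [intbitLoop, gRev]
  | [a, b], out => by simp [intbitLoop, gRev]
  | [a, b, c], out => by simp [intbitLoop, gRev]
  | a :: b :: c :: d :: rest, out => by
    have h3 : intbitLoop (a :: b :: c :: d :: rest) (0, out)
        = intbitLoop (d :: rest) (3, out ++ [a, b, c]) := by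
      simp [intbitLoop, List.foldl]
    rw [h3, loop_step3 _ _ (by simp), loopA (d :: rest) (out ++ [a, b, c] ++ [' '])]
    conv_rhs => rw [gRev]
    rw [if_neg (by simp)]
    simp
termination_by r _ => r.length

theorem revA (s : List Char) : (gRev s.reverse).reverse = groupChars s := by
  by_cases h : s.length ≤ 3
  · rw [groupChars, if_pos h, gRev, if_pos (by simpa using h)]
    simp
  · rw [groupChars, if_neg h, gRev, if_neg (by simpa using h)]
    rw [PySem.List.slice_to_neg_ofNat s 3 (by omega),
        PySem.List.slice_from_neg_ofNat s 3 (by omega)]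
    have hd : s.reverse.drop 3 = (s.take (s.length - 3)).reverse := by
      rw [List.drop_reverse]
    have ht : s.reverse.take 3 = (s.drop (s.length - 3)).reverse := by
      rw [List.take_reverse]
    rw [hd, ht, List.reverse_append, List.reverse_cons, revA (s.take (s.length - 3))]
    simp
termination_by s.length
decreasing_by simp [List.length_take]; omega

-- ===== VERDICT (by name: the statement is the Claim_ definition above) =====
theorem intbit_spec : Claim_equal_intbit := by
  intro number _
  unfold Spec_intbit intbit intbit_alt
  rw [loopA, List.nil_append, revA]
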